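-- pv_equiv track=rewrite | github.com/akgoldberg/lottery | algorithm.py | prune_instance
-- ===== SOURCE A (Python) =====
-- def get_constraints(intervals):
--     n = len(intervals)
--     # tuples where LCB_i > UCB_j => i < j
--     constraints = [(i,j) for i in range(n) for j in range(n) if intervals[i][0] > intervals[j][1]]
--     return constraints
--
-- def prune_instance(intervals, T):
--     n = len(intervals)
--     constraints = get_constraints(intervals)
--     A = [0]*len(intervals)
--     B = [0]*len(intervals)
--     for c in constraints:
--         A[c[0]] += 1 # num intervals that i is strictly above
--         B[c[1]] += 1 # num intervals that i is strictly below
--     # if A[i] >= n-T, then i must be in the top T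
--     top = [i for i in range(n) if A[i] >= n-T]
--     # if B[i] >= T, then i is never in the top T
--     bottom = [i for i in range(n) if B[i] >= T]
--     # remove top and bottom from intervals
--     intervals = [i for i in range(n) if i not in top+bottom]
--     return intervals, top, bottom
-- ===== SOURCE B (Python) =====
-- def _bisect_left(a, x):
--     lo, hi = 0, len(a)
--     while lo < hi:
--         mid = (lo + hi) // 2
--         if a[mid] < x:
--             lo = mid + 1
--         else:
--             hi = mid
--     return lo
--
-- def _bisect_right(a, x):
--     lo, hi = 0, len(a)
--     while lo < hi:
--         mid = (lo + hi) // 2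
--         if x < a[mid]:
--             hi = mid
--         else:
--             lo = mid + 1
--     return lo
--
-- def prune_instance(intervals, T):
--     n = len(intervals)
--     ucbs = sorted([iv[1] for iv in intervals])
--     lcbs = sorted([iv[0] for iv in intervals])
--     rest, top, bottom = [], [], []
--     for i, (l, u) in enumerate(intervals):
--         above = _bisect_left(ucbs, l)       # intervals i is strictly above
--         below = n - _bisect_right(lcbs, u)  # intervals i is strictly below
--         in_top = above >= n - T
--         in_bottom = below >= T
--         if in_top:
--             top.append(i)
--         if in_bottom:
--             bottom.append(i)
--         if not (in_top or in_bottom):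
--             rest.append(i)
--     return rest, top, bottom
-- ===== Notes on version B (the rewrite author's own statement) =====
-- stated objective: faster
-- what changed: Replaces the O(n^2) enumeration of all dominating pairs plus per-pair counter updates by sorting the LCB and UCB arrays once and computing each interval's dominance counts with binary search (hand-written bisect, since A imports nothing).
import Mathlib
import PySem

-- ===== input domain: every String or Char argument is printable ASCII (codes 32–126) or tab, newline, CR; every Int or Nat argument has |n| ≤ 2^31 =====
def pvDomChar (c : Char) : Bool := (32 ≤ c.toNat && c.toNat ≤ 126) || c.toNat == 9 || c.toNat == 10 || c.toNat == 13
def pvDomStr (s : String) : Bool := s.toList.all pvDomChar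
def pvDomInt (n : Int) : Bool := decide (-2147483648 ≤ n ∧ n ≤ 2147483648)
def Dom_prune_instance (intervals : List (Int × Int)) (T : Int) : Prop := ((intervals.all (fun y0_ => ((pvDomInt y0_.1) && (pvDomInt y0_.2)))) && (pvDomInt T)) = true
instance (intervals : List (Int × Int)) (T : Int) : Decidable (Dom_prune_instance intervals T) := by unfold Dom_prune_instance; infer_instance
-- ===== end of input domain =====

-- B replaces A's O(n^2) all-pairs dominance enumeration by sorting the LCB/UCB arrays once
-- and counting dominances per interval with binary search (objective: faster, O(n log n)).


-- ===== PORT A =====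
-- helper of A: all ordered pairs (i, j) with LCB_i > UCB_j
def get_constraints (intervals : List (Int × Int)) : List (Nat × Nat) :=
  (List.range intervals.length).flatMap (fun i =>
    (List.range intervals.length).filterMap (fun j =>
      if (intervals.getD i (0, 0)).1 > (intervals.getD j (0, 0)).2 then some (i, j) else none))

def prune_instance (intervals : List (Int × Int)) (T : Int) : List Int × List Int × List Int :=
  let n := intervals.length
  let constraints := get_constraints intervals
  let ab := constraints.foldl
      (fun (ab : List Int × List Int) c =>
        (ab.1.modify c.1 (· + 1), ab.2.modify c.2 (· + 1)))
      (List.replicate n (0 : Int), List.replicate n (0 : Int))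
  let top := (List.range n).filterMap (fun (i : Nat) => if ab.1.getD i 0 ≥ (n : Int) - T then some ((i : Int)) else none)
  let bottom := (List.range n).filterMap (fun (i : Nat) => if ab.2.getD i 0 ≥ T then some ((i : Int)) else none)
  let rest := (List.range n).filterMap (fun (i : Nat) => if ((i : Int)) ∈ top ++ bottom then none else some ((i : Int)))
  (rest, top, bottom)

-- ===== PORT B =====
-- Source B's _bisect_left/_bisect_right are the standard lo/hi binary-search loops; they are ported
-- as PySem.List.bisectLeft / bisectRight, which are exactly that loop (same midpoints, same steps).
def prune_instance_alt (intervals : List (Int × Int)) (T : Int) : List Int × List Int × List Int :=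
  let n := intervals.length
  let ucbs := PySem.List.sorted (intervals.map (fun iv => iv.2)) (fun x => x) false
  let lcbs := PySem.List.sorted (intervals.map (fun iv => iv.1)) (fun x => x) false
  (PySem.List.enumerate intervals).foldl
    (fun (acc : List Int × List Int × List Int) p =>
      let i := p.1
      let l := p.2.1
      let u := p.2.2
      let above := PySem.List.bisectLeft ucbs l
      let below := (n : Int) - (PySem.List.bisectRight lcbs u : Int)
      let inTop : Bool := decide ((above : Int) ≥ (n : Int) - T)
      let inBottom : Bool := decide (below ≥ T)
      ((if inTop || inBottom then acc.1 else acc.1 ++ [i]),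
       (if inTop then acc.2.1 ++ [i] else acc.2.1),
       (if inBottom then acc.2.2 ++ [i] else acc.2.2)))
    ([], [], [])

-- ===== PRECONDITION & SPEC =====
def Spec_prune_instance (intervals : List (Int × Int)) (T : Int) (out : List Int × List Int × List Int) : Prop := out = prune_instance_alt intervals T
instance (intervals : List (Int × Int)) (T : Int) (out : List Int × List Int × List Int) : Decidable (Spec_prune_instance intervals T out) := by unfold Spec_prune_instance; infer_instance

-- ===== CLAIM (what is proved, stated in full; the proofs are below) =====
def Claim_equal_prune_instance : Prop := ∀ (intervals : List (Int × Int)) (T : Int), Dom_prune_instance intervals T → Spec_prune_instance intervals T (prune_instance intervals T)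

-- ===== LEMMAS AND PROOFS =====

-- number of intervals interval i is strictly above (LCB_i > UCB_j), resp. strictly below
def cntAbove (intervals : List (Int × Int)) (i : Nat) : Nat :=
  intervals.countP (fun iv => (intervals.getD i (0, 0)).1 > iv.2)
def cntBelow (intervals : List (Int × Int)) (i : Nat) : Nat :=
  intervals.countP (fun iv => iv.1 > (intervals.getD i (0, 0)).2)

-- the common normal form both ports are reduced to
def condTop (intervals : List (Int × Int)) (T : Int) (j : Nat) : Bool :=
  decide ((cntAbove intervals j : Int) ≥ (intervals.length : Int) - T)
def condBot (intervals : List (Int × Int)) (T : Int) (j : Nat) : Bool :=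
  decide ((cntBelow intervals j : Int) ≥ T)
def canon (intervals : List (Int × Int)) (T : Int) : List Int × List Int × List Int :=
  (((List.range intervals.length).filter
      (fun j => !(condTop intervals T j || condBot intervals T j))).map (fun (j : Nat) => (j : Int)),
   ((List.range intervals.length).filter (condTop intervals T)).map (fun (j : Nat) => (j : Int)),
   ((List.range intervals.length).filter (condBot intervals T)).map (fun (j : Nat) => (j : Int)))

theorem map_getD_range_self (xs : List (Int × Int)) :
    (List.range xs.length).map (fun j => xs.getD j (0, 0)) = xs := by
  apply List.ext_getElem
  · simp
  · intro i h1 h2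
    simp [List.getElem?_eq_getElem h2]

theorem countP_range_getD (xs : List (Int × Int)) (p : Int × Int → Bool) :
    (List.range xs.length).countP (fun j => p (xs.getD j (0, 0))) = xs.countP p := by
  conv_rhs => rw [← map_getD_range_self xs]
  rw [List.countP_map]; rfl

theorem sum_map_range_monoid {M : Type} [AddCommMonoid M] (f : Nat → M) (n : Nat) :
    ((List.range n).map f).sum = ∑ x ∈ Finset.range n, f x := by
  induction n with
  | zero => simp
  | succ m ih => rw [List.range_succ, Finset.sum_range_succ]; simp [ih]

theorem sum_map_ite_one_nat (p : Nat → Bool) (l : List Nat) :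
    (l.map (fun x => if p x then 1 else 0)).sum = l.countP p := by
  induction l with
  | nil => rfl
  | cons x xs ih => by_cases h : p x <;> simp [h, ih] <;> omega

theorem filterMap_if_eq_map_filter {α β : Type} (g : α → β) (c : α → Prop) [DecidablePred c]
    (l : List α) :
    l.filterMap (fun j => if c j then some (g j) else none)
      = (l.filter (fun j => decide (c j))).map g := by
  induction l with
  | nil => rfl
  | cons x xs ih => by_cases h : c x <;> simp [h, ih]

theorem filterMap_ifnot_eq_map_filter {α β : Type} (g : α → β) (c : α → Prop) [DecidablePred c]
    (l : List α) :
    l.filterMap (fun j => if c j then none else some (g j))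
      = (l.filter (fun j => !decide (c j))).map g := by
  induction l with
  | nil => rfl
  | cons x xs ih => by_cases h : c x <;> simp [h, ih]

theorem getD_modify (l : List Int) (k i : Nat) (f : Int → Int) (hi : i < l.length) :
    (l.modify k f).getD i 0 = if k = i then f (l.getD i 0) else l.getD i 0 := by
  have h1 : i < (l.modify k f).length := by simpa using hi
  rw [List.getD_eq_getElem _ _ h1, List.getD_eq_getElem _ _ hi, List.getElem_modify]

-- the A-side counting fold: result[i] = initial[i] + number of constraints hitting i
theorem fold_counts (cs : List (Nat × Nat)) (Aa Ba : List Int)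
    (hA : ∀ c ∈ cs, c.1 < Aa.length) (hB : ∀ c ∈ cs, c.2 < Ba.length)
    (i : Nat) (hiA : i < Aa.length) (hiB : i < Ba.length) :
    (cs.foldl (fun (ab : List Int × List Int) c =>
        (ab.1.modify c.1 (· + 1), ab.2.modify c.2 (· + 1))) (Aa, Ba)).1.getD i 0
      = Aa.getD i 0 + (cs.countP (fun c => c.1 == i) : Int)
    ∧ (cs.foldl (fun (ab : List Int × List Int) c =>
        (ab.1.modify c.1 (· + 1), ab.2.modify c.2 (· + 1))) (Aa, Ba)).2.getD i 0
      = Ba.getD i 0 + (cs.countP (fun c => c.2 == i) : Int) := by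
  induction cs generalizing Aa Ba with
  | nil => simp
  | cons c cs ih =>
    have hA' : ∀ d ∈ cs, d.1 < (Aa.modify c.1 (· + 1)).length := by
      intro d hd; simpa using hA d (List.mem_cons_of_mem _ hd)
    have hB' : ∀ d ∈ cs, d.2 < (Ba.modify c.2 (· + 1)).length := by
      intro d hd; simpa using hB d (List.mem_cons_of_mem _ hd)
    have hiA' : i < (Aa.modify c.1 (· + 1)).length := by simpa using hiA
    have hiB' : i < (Ba.modify c.2 (· + 1)).length := by simpa using hiB
    obtain ⟨ih1, ih2⟩ := ih (Aa.modify c.1 (· + 1)) (Ba.modify c.2 (· + 1)) hA' hB' hiA' hiB'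
    constructor
    · rw [List.foldl_cons, ih1, getD_modify _ _ _ _ hiA, List.countP_cons]
      by_cases h : c.1 = i <;> simp [h] <;> push_cast <;> ring
    · rw [List.foldl_cons, ih2, getD_modify _ _ _ _ hiB, List.countP_cons]
      by_cases h : c.2 = i <;> simp [h] <;> push_cast <;> ring

-- the constraints with first component i are exactly the j's that i dominates
theorem countP_constraints_fst (intervals : List (Int × Int)) (i : Nat)
    (hi : i < intervals.length) :
    (get_constraints intervals).countP (fun c => c.1 == i) = cntAbove intervals i := by
  unfold get_constraints
  rw [List.countP_flatMap]
  have hpt : ∀ i' ∈ List.range intervals.length,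
      (List.countP (fun c : Nat × Nat => c.1 == i) ∘ fun i' =>
        (List.range intervals.length).filterMap (fun j =>
          if (intervals.getD i' (0, 0)).1 > (intervals.getD j (0, 0)).2 then some (i', j) else none)) i'
      = if i' = i then cntAbove intervals i else 0 := by
    intro i' _
    simp only [Function.comp]
    rw [filterMap_if_eq_map_filter (fun j => ((i', j) : Nat × Nat))
        (fun j => (intervals.getD i' (0, 0)).1 > (intervals.getD j (0, 0)).2),
      List.countP_map]
    by_cases h : i' = i
    · subst h
      have : ((fun c : Nat × Nat => c.1 == i') ∘ fun j => ((i', j) : Nat × Nat))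
          = fun _ => true := by funext j; simp
      rw [this, List.countP_true, if_pos rfl, ← List.countP_eq_length_filter,
        countP_range_getD intervals (fun iv => decide ((intervals.getD i' (0, 0)).1 > iv.2))]
      rfl
    · have : ((fun c : Nat × Nat => c.1 == i) ∘ fun j => ((i', j) : Nat × Nat))
          = fun _ => false := by funext j; simp [h]
      rw [this, List.countP_false, if_neg h]
      rfl
  rw [List.map_congr_left hpt, sum_map_range_monoid]
  rw [Finset.sum_ite_eq' (Finset.range intervals.length) i (fun _ => cntAbove intervals i)]
  simp [hi]

-- the constraints with second component i are exactly the j's dominating i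
theorem countP_constraints_snd (intervals : List (Int × Int)) (i : Nat)
    (hi : i < intervals.length) :
    (get_constraints intervals).countP (fun c => c.2 == i) = cntBelow intervals i := by
  unfold get_constraints
  rw [List.countP_flatMap]
  have hpt : ∀ i' ∈ List.range intervals.length,
      (List.countP (fun c : Nat × Nat => c.2 == i) ∘ fun i' =>
        (List.range intervals.length).filterMap (fun j =>
          if (intervals.getD i' (0, 0)).1 > (intervals.getD j (0, 0)).2 then some (i', j) else none)) i'
      = if (intervals.getD i' (0, 0)).1 > (intervals.getD i (0, 0)).2 then 1 else 0 := by
    intro i' _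
    simp only [Function.comp]
    rw [filterMap_if_eq_map_filter (fun j => ((i', j) : Nat × Nat))
        (fun j => (intervals.getD i' (0, 0)).1 > (intervals.getD j (0, 0)).2),
      List.countP_map]
    have : ((fun c : Nat × Nat => c.2 == i) ∘ fun j => ((i', j) : Nat × Nat))
        = fun j => j == i := by funext j; simp
    rw [this, ← List.count_eq_countP]
    by_cases hc : (intervals.getD i' (0, 0)).1 > (intervals.getD i (0, 0)).2
    · rw [List.count_filter (by simpa using hc), List.count_range, if_pos hc]
      simp [hi]
    · rw [if_neg hc, List.count_eq_zero]
      simp only [List.mem_filter, List.mem_range, not_and]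
      intro _
      simp only [decide_eq_true_eq]
      exact hc
  rw [List.map_congr_left hpt]
  have hconv : (List.map (fun a => if (intervals.getD a (0, 0)).1 > (intervals.getD i (0, 0)).2
        then 1 else 0) (List.range intervals.length)).sum
      = (List.range intervals.length).countP
          (fun a => decide ((intervals.getD a (0, 0)).1 > (intervals.getD i (0, 0)).2)) := by
    rw [← sum_map_ite_one_nat]
    apply congrArg
    apply List.map_congr_left
    intro a _
    simp
  rw [hconv, countP_range_getD intervals (fun iv => decide (iv.1 > (intervals.getD i (0, 0)).2))]
  rfl

-- bisect_left on a sorted list counts the elements below x; bisect_right those ≤ x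
theorem bisectLeft_eq_countP (s : List Int) (hs : s.Pairwise (· ≤ ·)) (x : Int) :
    PySem.List.bisectLeft s x = s.countP (fun v => v < x) := by
  obtain ⟨hle, hlt, hge⟩ := PySem.List.bisectLeft_spec s x hs
  set k := PySem.List.bisectLeft s x with hk
  have : s.countP (fun v => v < x) =
      (s.take k).countP (fun v => v < x) + (s.drop k).countP (fun v => v < x) := by
    rw [← List.countP_append, List.take_append_drop]
  rw [this]
  have h1 : (s.take k).countP (fun v => v < x) = (s.take k).length := by
    rw [List.countP_eq_length]
    intro a ha
    obtain ⟨j, hj, rfl⟩ := List.mem_iff_getElem.mp ha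
    have hjk : j < k := by simp [List.length_take] at hj; omega
    simp only [List.getElem_take]
    exact decide_eq_true (hlt j (by omega) hjk)
  have h2 : (s.drop k).countP (fun v => v < x) = 0 := by
    rw [List.countP_eq_zero]
    intro a ha
    obtain ⟨j, hj, rfl⟩ := List.mem_iff_getElem.mp ha
    simp only [List.getElem_drop]
    have := hge (k + j) (by simp at hj; omega) (by omega)
    simp; omega
  rw [h1, h2, List.length_take]; omega

theorem bisectRight_eq_countP (s : List Int) (hs : s.Pairwise (· ≤ ·)) (x : Int) :
    PySem.List.bisectRight s x = s.countP (fun v => v ≤ x) := by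
  obtain ⟨hle, hlt, hge⟩ := PySem.List.bisectRight_spec s x hs
  set k := PySem.List.bisectRight s x with hk
  have : s.countP (fun v => v ≤ x) =
      (s.take k).countP (fun v => v ≤ x) + (s.drop k).countP (fun v => v ≤ x) := by
    rw [← List.countP_append, List.take_append_drop]
  rw [this]
  have h1 : (s.take k).countP (fun v => v ≤ x) = (s.take k).length := by
    rw [List.countP_eq_length]
    intro a ha
    obtain ⟨j, hj, rfl⟩ := List.mem_iff_getElem.mp ha
    have hjk : j < k := by simp [List.length_take] at hj; omega
    simp only [List.getElem_take]
    exact decide_eq_true (hlt j (by omega) hjk)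
  have h2 : (s.drop k).countP (fun v => v ≤ x) = 0 := by
    rw [List.countP_eq_zero]
    intro a ha
    obtain ⟨j, hj, rfl⟩ := List.mem_iff_getElem.mp ha
    simp only [List.getElem_drop]
    have := hge (k + j) (by simp at hj; omega) (by omega)
    simp; omega
  rw [h1, h2, List.length_take]; omega

-- the B-side loop, unrolled into three filters
theorem foldl_triple {α : Type} (pT pB : α → Bool) (g : α → Int) (l : List α) (r t b : List Int) :
    l.foldl (fun (acc : List Int × List Int × List Int) x =>
      ((if pT x || pB x then acc.1 else acc.1 ++ [g x]),
       (if pT x then acc.2.1 ++ [g x] else acc.2.1),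
       (if pB x then acc.2.2 ++ [g x] else acc.2.2))) (r, t, b)
    = (r ++ (l.filter (fun x => !(pT x || pB x))).map g,
       t ++ (l.filter pT).map g,
       b ++ (l.filter pB).map g) := by
  induction l generalizing r t b with
  | nil => simp
  | cons x xs ih =>
    simp only [List.foldl_cons, ih, List.filter_cons]
    by_cases h1 : pT x <;> by_cases h2 : pB x <;> simp [h1, h2]

-- every constraint index is a valid position
theorem mem_get_constraints (intervals : List (Int × Int)) (c : Nat × Nat)
    (hc : c ∈ get_constraints intervals) : c.1 < intervals.length ∧ c.2 < intervals.length := by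
  simp only [get_constraints, List.mem_flatMap, List.mem_filterMap, List.mem_range] at hc
  obtain ⟨i', hi', j, hj, heq⟩ := hc
  split at heq
  · cases heq; exact ⟨hi', hj⟩
  · cases heq

-- A reduces to the normal form
theorem A_eq_canon (intervals : List (Int × Int)) (T : Int) :
    prune_instance intervals T = canon intervals T := by
  have hmem := mem_get_constraints intervals
  have hrep : (List.replicate intervals.length (0 : Int)).length = intervals.length := by simp
  have hAB := fun (j : Nat) (hj : j < intervals.length) =>
    fold_counts (get_constraints intervals)
      (List.replicate intervals.length (0 : Int)) (List.replicate intervals.length (0 : Int))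
      (fun c hc => by simpa using (hmem c hc).1) (fun c hc => by simpa using (hmem c hc).2)
      j (by simpa using hj) (by simpa using hj)
  have hA : ∀ j, j < intervals.length →
      ((get_constraints intervals).foldl (fun (ab : List Int × List Int) c =>
        (ab.1.modify c.1 (· + 1), ab.2.modify c.2 (· + 1)))
        (List.replicate intervals.length (0 : Int), List.replicate intervals.length (0 : Int))).1.getD j 0
      = (cntAbove intervals j : Int) := by
    intro j hj
    rw [(hAB j hj).1, countP_constraints_fst intervals j hj,
      List.getD_eq_getElem _ _ (by simpa using hj)]
    simp
  have hB : ∀ j, j < intervals.length →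
      ((get_constraints intervals).foldl (fun (ab : List Int × List Int) c =>
        (ab.1.modify c.1 (· + 1), ab.2.modify c.2 (· + 1)))
        (List.replicate intervals.length (0 : Int), List.replicate intervals.length (0 : Int))).2.getD j 0
      = (cntBelow intervals j : Int) := by
    intro j hj
    rw [(hAB j hj).2, countP_constraints_snd intervals j hj,
      List.getD_eq_getElem _ _ (by simpa using hj)]
    simp
  simp only [prune_instance]
  rw [filterMap_if_eq_map_filter, filterMap_if_eq_map_filter, filterMap_ifnot_eq_map_filter]
  have htop : (List.range intervals.length).filter
      (fun i => decide (((get_constraints intervals).foldl (fun (ab : List Int × List Int) c =>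
        (ab.1.modify c.1 (· + 1), ab.2.modify c.2 (· + 1)))
        (List.replicate intervals.length (0 : Int), List.replicate intervals.length (0 : Int))).1.getD i 0
        ≥ (intervals.length : Int) - T))
      = (List.range intervals.length).filter (condTop intervals T) := by
    apply List.filter_congr
    intro j hj
    rw [hA j (List.mem_range.mp hj)]
    rfl
  have hbot : (List.range intervals.length).filter
      (fun i => decide (((get_constraints intervals).foldl (fun (ab : List Int × List Int) c =>
        (ab.1.modify c.1 (· + 1), ab.2.modify c.2 (· + 1)))
        (List.replicate intervals.length (0 : Int), List.replicate intervals.length (0 : Int))).2.getD i 0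
        ≥ T))
      = (List.range intervals.length).filter (condBot intervals T) := by
    apply List.filter_congr
    intro j hj
    rw [hB j (List.mem_range.mp hj)]
    rfl
  rw [htop, hbot]
  simp only [canon]
  refine congrArg₂ Prod.mk ?_ (congrArg₂ Prod.mk rfl rfl)
  refine congrArg _ (List.filter_congr ?_)
  intro j hj
  have hjn := List.mem_range.mp hj
  by_cases h1 : condTop intervals T j <;> by_cases h2 : condBot intervals T j <;>
    simp [h1, h2, List.mem_append, List.mem_map, List.mem_filter, List.mem_range, hjn]

-- B reduces to the normal form
theorem B_eq_canon (intervals : List (Int × Int)) (T : Int) :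
    prune_instance_alt intervals T = canon intervals T := by
  simp only [prune_instance_alt]
  rw [foldl_triple]
  rw [PySem.List.enumerate_eq_map_pyRange intervals (0, 0)]
  have hlen : PySem.List.len intervals = (intervals.length : Int) := rfl
  rw [hlen, PySem.List.pyRange_zero_natCast, List.map_map, List.filter_map, List.filter_map,
    List.filter_map, List.map_map, List.map_map, List.map_map]
  have hucb : (PySem.List.sorted (intervals.map (fun iv => iv.2)) (fun x => x) false).Pairwise
      (fun a b => a ≤ b) := PySem.List.sorted_pairwise _ _
  have hlcb : (PySem.List.sorted (intervals.map (fun iv => iv.1)) (fun x => x) false).Pairwise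
      (fun a b => a ≤ b) := PySem.List.sorted_pairwise _ _
  have habove : ∀ x : Int,
      PySem.List.bisectLeft (PySem.List.sorted (intervals.map (fun iv => iv.2)) (fun x => x) false) x
      = intervals.countP (fun iv => x > iv.2) := by
    intro x
    rw [bisectLeft_eq_countP _ hucb x,
      (PySem.List.sorted_perm (intervals.map (fun iv => iv.2)) (fun x => x) false).countP_eq,
      List.countP_map]
    rfl
  have hbelow : ∀ x : Int,
      (PySem.List.bisectRight (PySem.List.sorted (intervals.map (fun iv => iv.1)) (fun x => x) false) x : Int)
      = (intervals.length : Int) - (intervals.countP (fun iv => iv.1 > x) : Int) := by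
    intro x
    rw [bisectRight_eq_countP _ hlcb x,
      (PySem.List.sorted_perm (intervals.map (fun iv => iv.1)) (fun x => x) false).countP_eq,
      List.countP_map]
    have hsum : intervals.countP ((fun v => decide (v ≤ x)) ∘ fun iv => iv.1)
        + intervals.countP (fun iv => decide (iv.1 > x)) = intervals.length := by
      have h2 : (fun iv : Int × Int => decide (iv.1 > x))
          = fun iv : Int × Int => !(decide (iv.1 ≤ x)) := by
        funext iv; by_cases h : iv.1 ≤ x <;> simp [h]; omega
      have h1 : ((fun v => decide (v ≤ x)) ∘ fun iv : Int × Int => iv.1)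
          = fun iv : Int × Int => decide (iv.1 ≤ x) := rfl
      rw [h1, h2, List.countP_eq_length_filter, List.countP_eq_length_filter]
      exact (List.length_eq_length_filter_add (fun iv : Int × Int => decide (iv.1 ≤ x))).symm
    omega
  simp only [List.nil_append, canon]
  refine congrArg₂ Prod.mk ?_ (congrArg₂ Prod.mk ?_ ?_)
  · refine congrArg _ (List.filter_congr ?_)
    intro j hj
    simp only [Function.comp, PySem.List.pyGetD_natCast, habove, hbelow,
      condTop, condBot, cntAbove, cntBelow]
    congr 2
    rw [decide_eq_decide]
    omega
  · refine congrArg _ (List.filter_congr ?_)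
    intro j hj
    simp only [Function.comp, PySem.List.pyGetD_natCast, habove, condTop, cntAbove]
    rfl
  · refine congrArg _ (List.filter_congr ?_)
    intro j hj
    simp only [Function.comp, PySem.List.pyGetD_natCast, hbelow, condBot, cntBelow]
    rw [decide_eq_decide]
    omega

-- ===== VERDICT (by name: the statement is the Claim_ definition above) =====
theorem prune_instance_spec : Claim_equal_prune_instance := by
  intro intervals T _
  unfold Spec_prune_instance
  rw [A_eq_canon, B_eq_canon]
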